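-- pv_equiv track=rewrite | github.com/bkille/pooled-testing-sim | StudentProtocols/TheBoys.py | pool
-- ===== SOURCE A (Python) =====
-- def pool(min: int, max: int, groups: int):
--     total_numbers = max - min + 1
--     base_group_size = total_numbers // groups
--     remainder = total_numbers % groups
--     result = []
--     start = min
--
--     for i in range(groups):
--         current_group_size = base_group_size + (1 if i < remainder else 0)
--         group = list(range(start, start + current_group_size))
--         result.append(group)
--         start += current_group_size
--
--     return result
-- ===== SOURCE B (Python) =====
-- def pool(min: int, max: int, groups: int):
--     total_numbers = max - min + 1
--     base_group_size = total_numbers // groups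
--     remainder = total_numbers % groups
--     bounds = [i * base_group_size + (i if i < remainder else remainder)
--               for i in range(groups + 1)]
--     return [list(range(min + a, min + b)) for a, b in zip(bounds, bounds[1:])]
-- ===== Notes on version B (the rewrite author's own statement) =====
-- stated objective: alternative
-- what changed: B precomputes the closed-form cut boundaries i*base + min(i, remainder) and builds each group between consecutive boundaries (zipping the boundary list with its tail), instead of A's loop that accumulates a running start and a per-iteration group size.
import Mathlib
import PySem

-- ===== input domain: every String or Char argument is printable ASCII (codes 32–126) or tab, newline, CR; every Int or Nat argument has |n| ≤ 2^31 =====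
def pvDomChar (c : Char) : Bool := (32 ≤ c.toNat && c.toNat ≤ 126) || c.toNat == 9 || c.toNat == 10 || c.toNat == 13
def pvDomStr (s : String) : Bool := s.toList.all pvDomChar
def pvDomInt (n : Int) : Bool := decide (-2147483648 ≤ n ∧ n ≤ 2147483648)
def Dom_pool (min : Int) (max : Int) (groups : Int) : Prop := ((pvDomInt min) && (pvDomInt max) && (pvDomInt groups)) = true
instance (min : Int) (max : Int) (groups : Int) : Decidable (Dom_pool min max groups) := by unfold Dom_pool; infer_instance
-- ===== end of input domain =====

-- B precomputes closed-form cut boundaries and builds each group between consecutive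
-- boundaries, instead of A's running-start accumulator loop (objective: alternative decomposition).

-- ===== PORT A =====
def pool (min : Int) (max : Int) (groups : Int) : List (List Int) :=
  let total_numbers := max - min + 1
  let base_group_size := PySem.Int.floordiv total_numbers groups
  let remainder := PySem.Int.mod total_numbers groups
  let st := (PySem.List.pyRange 0 groups 1).foldl
    (fun (acc : List (List Int) × Int) i =>
      let current_group_size := base_group_size + (if i < remainder then 1 else 0)
      let group := PySem.List.pyRange acc.2 (acc.2 + current_group_size) 1
      -- result.append(group): ported as cons + one final reverse (Python's O(1) append)
      (group :: acc.1, acc.2 + current_group_size))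
    ([], min)
  st.1.reverse

-- ===== PORT B =====
def pool_alt (min : Int) (max : Int) (groups : Int) : List (List Int) :=
  let total_numbers := max - min + 1
  let base_group_size := PySem.Int.floordiv total_numbers groups
  let remainder := PySem.Int.mod total_numbers groups
  let bounds := (PySem.List.pyRange 0 (groups + 1) 1).map
    (fun i => i * base_group_size + (if i < remainder then i else remainder))
  -- zip(bounds, bounds[1:]): bounds[1:] is slice from 1
  (bounds.zip (PySem.List.slice bounds (some 1) none)).map (fun ab =>
    PySem.List.pyRange (min + ab.1) (min + ab.2) 1)

-- ===== PRECONDITION & SPEC =====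
-- Pre_ excludes exactly groups = 0, where both Pythons raise ZeroDivisionError on '// groups'.
def Pre_pool (min : Int) (max : Int) (groups : Int) : Prop := groups ≠ 0
instance (min : Int) (max : Int) (groups : Int) : Decidable (Pre_pool min max groups) := by unfold Pre_pool; infer_instance
def pvWitness_pool : Int × Int × Int := (1, 10, 3)
def Spec_pool (min : Int) (max : Int) (groups : Int) (out : List (List Int)) : Prop := out = pool_alt min max groups
instance (min : Int) (max : Int) (groups : Int) (out : List (List Int)) : Decidable (Spec_pool min max groups out) := by unfold Spec_pool; infer_instance

-- ===== CLAIM (what is proved, stated in full; the proofs are below) =====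
def Claim_equal_pool : Prop := ∀ (min : Int) (max : Int) (groups : Int), Dom_pool min max groups → Pre_pool min max groups → Spec_pool min max groups (pool min max groups)

-- ===== LEMMAS AND PROOFS =====

-- cut point i of B, as a function of base size and remainder
def pvBnd (base rem i : Int) : Int := i * base + (if i < rem then i else rem)

theorem pvBnd_zero (base rem : Int) (hr : 0 ≤ rem) : pvBnd base rem 0 = 0 := by
  simp only [pvBnd, zero_mul, zero_add]
  split_ifs <;> omega

theorem pvBnd_succ (base rem k : Int) :
    pvBnd base rem (k + 1) = pvBnd base rem k + (base + (if k < rem then 1 else 0)) := by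
  simp only [pvBnd]
  split_ifs with h1 h2 h2
  · ring
  · exfalso; omega
  · have : rem = k + 1 := by omega
    subst this; ring
  · ring

-- A's loop, over range(groups), computes the groups between consecutive cut points
theorem pvFoldA (base rem : Int) (hr : 0 ≤ rem) (m : Int) : ∀ (n : Nat),
    ((PySem.List.pyRange 0 (n : Int) 1).foldl
      (fun (acc : List (List Int) × Int) i =>
        (PySem.List.pyRange acc.2 (acc.2 + (base + (if i < rem then 1 else 0))) 1 :: acc.1,
         acc.2 + (base + (if i < rem then 1 else 0)))) ([], m))
    = (((PySem.List.pyRange 0 (n : Int) 1).map (fun i =>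
         PySem.List.pyRange (m + pvBnd base rem i) (m + pvBnd base rem (i + 1)) 1)).reverse,
       m + pvBnd base rem (n : Int)) := by
  intro n
  induction n with
  | zero => simp [PySem.List.pyRange_one_eq_nil (by omega : (0:Int) ≤ 0), pvBnd_zero base rem hr]
  | succ n ih =>
    have hcast : ((n + 1 : Nat) : Int) = (n : Int) + 1 := by push_cast; ring
    rw [hcast, PySem.List.pyRange_one_succ_right (by omega : (0:Int) ≤ (n : Int)),
        List.foldl_append, ih, List.map_append, List.reverse_append]
    simp only [List.foldl_cons, List.foldl_nil, List.map_cons, List.map_nil,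
      List.reverse_cons, List.reverse_nil, List.nil_append, List.cons_append]
    rw [pvBnd_succ base rem (n : Int)]
    simp only [← add_assoc]

-- zipping the cut-point list with its own tail pairs consecutive cut points
theorem pvZip (f : Int → Int) (g : Int) (hg : 0 ≤ g) :
    (((PySem.List.pyRange 0 (g + 1) 1).map f).zip
      (((PySem.List.pyRange 0 (g + 1) 1).map f).tail))
      = (PySem.List.pyRange 0 g 1).map (fun i => (f i, f (i + 1))) := by
  apply List.ext_getElem
  · simp [PySem.List.length_pyRange_one]
    omega
  · intro k h1 h2
    have hk : k < g.toNat := by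
      simp [PySem.List.length_pyRange_one] at h2; omega
    have hk1 : k + 1 < (g + 1 - 0).toNat := by omega
    simp only [List.getElem_zip, List.getElem_tail, List.getElem_map]
    rw [PySem.List.getElem_pyRange_one, PySem.List.getElem_pyRange_one, PySem.List.getElem_pyRange_one]
    push_cast
    norm_num

theorem pool_eq_alt (min max groups : Int) (hg : groups ≠ 0) :
    pool min max groups = pool_alt min max groups := by
  rcases lt_or_gt_of_ne hg with hneg | hpos
  · -- groups < 0 : both ranges over groups are empty
    have h1 : PySem.List.pyRange 0 groups 1 = [] := PySem.List.pyRange_one_eq_nil (by omega)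
    have h2 : PySem.List.pyRange 0 (groups + 1) 1 = [] := PySem.List.pyRange_one_eq_nil (by omega)
    simp [pool, pool_alt, h1, h2]
  · -- groups > 0
    set t := max - min + 1 with ht
    set base := PySem.Int.floordiv t groups with hbase
    set rem := PySem.Int.mod t groups with hrem
    have hr0 : 0 ≤ rem := PySem.Int.mod_nonneg t hpos
    have hgn : ((groups.toNat : Nat) : Int) = groups := Int.toNat_of_nonneg (le_of_lt hpos)
    -- A's loop produces the groups between consecutive cut points
    have hA : pool min max groups
        = (PySem.List.pyRange 0 groups 1).map (fun i =>
            PySem.List.pyRange (min + pvBnd base rem i) (min + pvBnd base rem (i + 1)) 1) := by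
      simp only [pool, ← ht, ← hbase, ← hrem]
      rw [← hgn, pvFoldA base rem hr0 min groups.toNat, List.reverse_reverse]
    -- B's zip of the cut list with its tail produces exactly the same groups
    have hB : pool_alt min max groups
        = (PySem.List.pyRange 0 groups 1).map (fun i =>
            PySem.List.pyRange (min + pvBnd base rem i) (min + pvBnd base rem (i + 1)) 1) := by
      simp only [pool_alt, ← ht, ← hbase, ← hrem]
      rw [PySem.List.slice_from_one,
          pvZip (fun j => j * base + (if j < rem then j else rem)) groups (le_of_lt hpos),
          List.map_map]
      rfl
    rw [hA, hB]

-- ===== VERDICT (by name: the statement is the Claim_ definition above) =====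
theorem pool_spec : Claim_equal_pool := by
  intro min max groups _ hpre
  unfold Spec_pool
  exact pool_eq_alt min max groups hpre
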